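-- pv_equiv track=rewrite | github.com/NahianSalsabil/CSE-406-Computer-Security-Sessional | Offline 1/1705091/1705091/f1_1705091.py | Shift_Row_Decryption
-- ===== SOURCE A (Python) =====
-- def Shift_Row_Decryption(state_matrix):
--     for i in range(0,4):
--         if i == 1:
--             temp = state_matrix[1][3]
--             state_matrix[i][3] = state_matrix[i][2]
--             state_matrix[i][2] = state_matrix[i][1]
--             state_matrix[i][1] = state_matrix[i][0]
--             state_matrix[i][0] = temp
--         if i == 2:
--             temp = state_matrix[i][2]
--             state_matrix[i][2] = state_matrix[i][0]
--             state_matrix[i][0] = temp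
--             temp = state_matrix[i][3]
--             state_matrix[i][3] = state_matrix[i][1]
--             state_matrix[i][1] = temp
--         if i == 3:
--             temp = state_matrix[i][0]
--             state_matrix[i][0] = state_matrix[i][1]
--             state_matrix[i][1] = state_matrix[i][2]
--             state_matrix[i][2] = state_matrix[i][3]
--             state_matrix[i][3] = temp
--     return state_matrix
-- ===== SOURCE B (Python) =====
-- def Shift_Row_Decryption(state_matrix):
--     # Rows 1..3 are right-rotated by i within their first 4 cells (row 0 is a no-op).
--     for i in range(1, 4):
--         row = state_matrix[i]
--         row[:4] = [row[(j - i) % 4] for j in range(4)]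
--     return state_matrix
-- ===== Notes on version B (the rewrite author's own statement) =====
-- stated objective: simpler
-- what changed: Replaces the three hand-unrolled per-row swap branches with one uniform loop that right-rotates row i by i positions within its first four cells via a modular-index comprehension and slice assignment.
import Mathlib
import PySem

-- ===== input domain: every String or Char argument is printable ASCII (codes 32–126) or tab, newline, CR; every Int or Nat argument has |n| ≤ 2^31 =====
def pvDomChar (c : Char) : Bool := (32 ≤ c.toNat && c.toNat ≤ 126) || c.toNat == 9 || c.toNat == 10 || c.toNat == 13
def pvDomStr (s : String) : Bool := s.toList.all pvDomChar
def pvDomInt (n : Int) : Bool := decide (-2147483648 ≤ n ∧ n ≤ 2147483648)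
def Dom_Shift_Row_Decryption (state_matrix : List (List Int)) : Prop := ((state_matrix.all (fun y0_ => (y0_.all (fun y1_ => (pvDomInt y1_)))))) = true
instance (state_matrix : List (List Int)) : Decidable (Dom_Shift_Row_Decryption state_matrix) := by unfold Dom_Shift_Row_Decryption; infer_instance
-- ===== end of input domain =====

-- B replaces A's hand-unrolled per-row swap branches with one uniform right-rotation by i of each
-- row's first four cells (objective: simpler). Both Pythons mutate the argument in place the same
-- way; the equivalence proved here is about the return value.

-- ===== PORT A =====
-- read state_matrix[i][j] / write state_matrix[i][j] = v (i, j are the literal nonnegative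
-- indices from A's code, so plain Nat indexing is exact here)
def pvGetRC (m : List (List Int)) (i j : Nat) : Int := (m.getD i []).getD j 0
def pvSetRC (m : List (List Int)) (i j : Nat) (v : Int) : List (List Int) :=
  m.set i ((m.getD i []).set j v)

-- one iteration of A's 'for i in range(0,4)' body (three successive ifs, assignments in order)
def pvStepA (m : List (List Int)) (i : Int) : List (List Int) :=
  let m1 :=
    if i == 1 then
      let temp := pvGetRC m 1 3
      let m := pvSetRC m 1 3 (pvGetRC m 1 2)
      let m := pvSetRC m 1 2 (pvGetRC m 1 1)
      let m := pvSetRC m 1 1 (pvGetRC m 1 0)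
      pvSetRC m 1 0 temp
    else m
  let m2 :=
    if i == 2 then
      let temp := pvGetRC m1 2 2
      let m := pvSetRC m1 2 2 (pvGetRC m1 2 0)
      let m := pvSetRC m 2 0 temp
      let temp := pvGetRC m 2 3
      let m := pvSetRC m 2 3 (pvGetRC m 2 1)
      pvSetRC m 2 1 temp
    else m1
  if i == 3 then
    let temp := pvGetRC m2 3 0
    let m := pvSetRC m2 3 0 (pvGetRC m2 3 1)
    let m := pvSetRC m 3 1 (pvGetRC m 3 2)
    let m := pvSetRC m 3 2 (pvGetRC m 3 3)
    pvSetRC m 3 3 temp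
  else m2

def Shift_Row_Decryption (state_matrix : List (List Int)) : List (List Int) :=
  (PySem.List.pyRange 0 4 1).foldl pvStepA state_matrix

-- ===== PORT B =====
-- one iteration of B's 'for i in range(1,4)' body: row[:4] = [row[(j-i)%4] for j in range(4)]
-- (i ∈ {1,2,3} here, so i.toNat in the write-back is exact)
def pvStepB (m : List (List Int)) (i : Int) : List (List Int) :=
  let row := PySem.List.pyGetD m i []
  let newFour := (PySem.List.pyRange 0 4 1).map
    (fun j => PySem.List.pyGetD row (PySem.Int.mod (j - i) 4) 0)
  m.set i.toNat (newFour ++ row.drop 4)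

def Shift_Row_Decryption_alt (state_matrix : List (List Int)) : List (List Int) :=
  (PySem.List.pyRange 1 4 1).foldl pvStepB state_matrix

-- ===== PRECONDITION & SPEC =====
-- Pre_ = exactly the inputs where the Python A returns (it indexes rows 1..3 and their cells 0..3;
-- otherwise IndexError): at least 4 rows, and rows 1, 2, 3 each at least 4 long.
def Pre_Shift_Row_Decryption (state_matrix : List (List Int)) : Prop :=
  4 ≤ state_matrix.length ∧
  4 ≤ (state_matrix.getD 1 []).length ∧
  4 ≤ (state_matrix.getD 2 []).length ∧
  4 ≤ (state_matrix.getD 3 []).length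
instance (state_matrix : List (List Int)) : Decidable (Pre_Shift_Row_Decryption state_matrix) := by
  unfold Pre_Shift_Row_Decryption; infer_instance

def pvWitness_Shift_Row_Decryption : List (List Int) :=
  [[1,2,3,4],[5,6,7,8],[9,10,11,12],[13,14,15,16]]

def Spec_Shift_Row_Decryption (state_matrix : List (List Int)) (out : List (List Int)) : Prop := out = Shift_Row_Decryption_alt state_matrix
instance (state_matrix : List (List Int)) (out : List (List Int)) : Decidable (Spec_Shift_Row_Decryption state_matrix out) := by unfold Spec_Shift_Row_Decryption; infer_instance

-- ===== CLAIM (what is proved, stated in full; the proofs are below) =====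
def Claim_equal_Shift_Row_Decryption : Prop := ∀ (state_matrix : List (List Int)), Dom_Shift_Row_Decryption state_matrix → Pre_Shift_Row_Decryption state_matrix → Spec_Shift_Row_Decryption state_matrix (Shift_Row_Decryption state_matrix)

-- ===== LEMMAS AND PROOFS =====

-- A on a fully exposed 4x4+ shape: rows 1,2,3 right-rotated by 1,2,3 within their first 4 cells
theorem stepA_eval (r0 : List Int) (a1 b1 c1 d1 a2 b2 c2 d2 a3 b3 c3 d3 : Int)
    (t1 t2 t3 : List Int) (rest : List (List Int)) :
    Shift_Row_Decryption
      (r0 :: (a1::b1::c1::d1::t1) :: (a2::b2::c2::d2::t2) :: (a3::b3::c3::d3::t3) :: rest) =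
      r0 :: (d1::a1::b1::c1::t1) :: (c2::d2::a2::b2::t2) :: (b3::c3::d3::a3::t3) :: rest := by
  simp [Shift_Row_Decryption, pvStepA, pvGetRC, pvSetRC,
        show PySem.List.pyRange 0 4 1 = [0,1,2,3] from by decide]

-- one B step each, at its row position
theorem stepB1 (r0 : List Int) (a b c d : Int) (t : List Int) (rs : List (List Int)) :
    pvStepB (r0::(a::b::c::d::t)::rs) 1 = r0::(d::a::b::c::t)::rs := by
  simp [pvStepB, pysem, show PySem.List.pyRange 0 4 1 = [0,1,2,3] from by decide]

theorem stepB2 (r0 r1 : List Int) (a b c d : Int) (t : List Int) (rs : List (List Int)) :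
    pvStepB (r0::r1::(a::b::c::d::t)::rs) 2 = r0::r1::(c::d::a::b::t)::rs := by
  simp [pvStepB, pysem, show PySem.List.pyRange 0 4 1 = [0,1,2,3] from by decide]

theorem stepB3 (r0 r1 r2 : List Int) (a b c d : Int) (t : List Int) (rs : List (List Int)) :
    pvStepB (r0::r1::r2::(a::b::c::d::t)::rs) 3 = r0::r1::r2::(b::c::d::a::t)::rs := by
  simp [pvStepB, pysem, show PySem.List.pyRange 0 4 1 = [0,1,2,3] from by decide]

-- B on the exposed shape: the three rotations chained
theorem stepB_eval (r0 : List Int) (a1 b1 c1 d1 a2 b2 c2 d2 a3 b3 c3 d3 : Int)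
    (t1 t2 t3 : List Int) (rest : List (List Int)) :
    Shift_Row_Decryption_alt
      (r0 :: (a1::b1::c1::d1::t1) :: (a2::b2::c2::d2::t2) :: (a3::b3::c3::d3::t3) :: rest) =
      r0 :: (d1::a1::b1::c1::t1) :: (c2::d2::a2::b2::t2) :: (b3::c3::d3::a3::t3) :: rest := by
  rw [Shift_Row_Decryption_alt, show PySem.List.pyRange 1 4 1 = [1,2,3] from by decide]
  rw [List.foldl_cons, stepB1, List.foldl_cons, stepB2, List.foldl_cons, stepB3, List.foldl_nil]

-- ===== VERDICT (by name: the statement is the Claim_ definition above) =====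
theorem Shift_Row_Decryption_spec : Claim_equal_Shift_Row_Decryption := by
  intro m _ hpre
  obtain ⟨h0, h1, h2, h3⟩ := hpre
  rcases m with _ | ⟨r0, _ | ⟨r1, _ | ⟨r2, _ | ⟨r3, rest⟩⟩⟩⟩ <;> simp at h0
  rcases r1 with _ | ⟨a1, _ | ⟨b1, _ | ⟨c1, _ | ⟨d1, t1⟩⟩⟩⟩ <;> simp at h1
  rcases r2 with _ | ⟨a2, _ | ⟨b2, _ | ⟨c2, _ | ⟨d2, t2⟩⟩⟩⟩ <;> simp at h2
  rcases r3 with _ | ⟨a3, _ | ⟨b3, _ | ⟨c3, _ | ⟨d3, t3⟩⟩⟩⟩ <;> simp at h3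
  show Spec_Shift_Row_Decryption _ _
  unfold Spec_Shift_Row_Decryption
  rw [stepA_eval, stepB_eval]
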